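-- pv_equiv track=rewrite | github.com/miliar/Code_Jam_Webscraper | solutions_python/Problem_179/1666.py | interpret_mod
-- ===== SOURCE A (Python) =====
-- def iterator(n):
--     i = 0
--     while i < n:
--         yield i
--         i += 1
--
-- def interpret_mod(nums, base, d):
--     x = 0
--     m = 1
--     for i in iterator(len(nums)):
--         x += (nums[-i-1] * (m % d)) % d
--         x %= d
--         m *= base
--     return x
-- ===== SOURCE B (Python) =====
-- def interpret_mod(nums, base, d):
--     x = 0
--     for c in nums:
--         x = (x * base + c) % d
--     return x
-- ===== Notes on version B (the rewrite author's own statement) =====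
-- stated objective: faster
-- what changed: B replaces A's LSB-first accumulation with an unbounded running power m=base^i and a custom index generator by a plain MSB-first Horner loop x=(x*base+c)%d over the list, keeping every intermediate bounded by d.
import Mathlib
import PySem

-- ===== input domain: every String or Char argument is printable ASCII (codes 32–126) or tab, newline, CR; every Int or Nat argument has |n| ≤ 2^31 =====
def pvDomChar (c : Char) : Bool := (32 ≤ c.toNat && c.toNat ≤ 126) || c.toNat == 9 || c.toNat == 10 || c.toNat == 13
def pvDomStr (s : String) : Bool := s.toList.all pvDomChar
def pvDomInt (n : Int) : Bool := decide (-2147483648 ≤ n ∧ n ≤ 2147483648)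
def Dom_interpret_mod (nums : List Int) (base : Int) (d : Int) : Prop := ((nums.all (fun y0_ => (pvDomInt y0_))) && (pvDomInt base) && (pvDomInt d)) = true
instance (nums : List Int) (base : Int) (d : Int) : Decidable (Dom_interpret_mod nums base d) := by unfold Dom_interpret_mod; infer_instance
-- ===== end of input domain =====

-- B is the idiomatic MSB-first Horner loop x=(x*base+c)%d; A walks the digits LSB-first
-- with a running power accumulator m and a custom index generator.

-- ===== PORT A =====
def interpret_mod (nums : List Int) (base : Int) (d : Int) : Int :=
  -- for i in iterator(len(nums)): x += (nums[-i-1] * (m % d)) % d; x %= d; m *= base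
  ((PySem.List.pyRange 0 (nums.length : Int) 1).foldl
    (fun (p : Int × Int) (i : Int) =>
      (PySem.Int.mod (p.1 + PySem.Int.mod (PySem.List.pyGetD nums (-i - 1) 0 * PySem.Int.mod p.2 d) d) d,
       p.2 * base))
    (0, 1)).1

-- ===== PORT B =====
def interpret_mod_alt (nums : List Int) (base : Int) (d : Int) : Int :=
  nums.foldl (fun x c => PySem.Int.mod (x * base + c) d) 0

-- ===== PRECONDITION & SPEC =====
-- Pre_ excludes exactly the inputs where the Python raises ZeroDivisionError:
-- d = 0 with a nonempty nums (both A and B perform `% d` once per element).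
def Pre_interpret_mod (nums : List Int) (base : Int) (d : Int) : Prop :=
  nums = [] ∨ d ≠ 0
instance (nums : List Int) (base : Int) (d : Int) : Decidable (Pre_interpret_mod nums base d) := by
  unfold Pre_interpret_mod; infer_instance

def pvWitness_interpret_mod : List Int × Int × Int := ([3, 1, 4], 10, 7)

def Spec_interpret_mod (nums : List Int) (base : Int) (d : Int) (out : Int) : Prop :=
  out = interpret_mod_alt nums base d
instance (nums : List Int) (base : Int) (d : Int) (out : Int) : Decidable (Spec_interpret_mod nums base d out) := by
  unfold Spec_interpret_mod; infer_instance

-- ===== CLAIM (what is proved, stated in full; the proofs are below) =====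
def Claim_equal_interpret_mod : Prop := ∀ (nums : List Int) (base : Int) (d : Int), Dom_interpret_mod nums base d → Pre_interpret_mod nums base d → Spec_interpret_mod nums base d (interpret_mod nums base d)

-- ===== LEMMAS AND PROOFS =====

-- d divides a - (a mod d)  (Python mod)
theorem pv_dvd_sub_mod (a b : Int) : b ∣ (a - PySem.Int.mod a b) :=
  ⟨PySem.Int.floordiv a b, by
    have h := PySem.Int.floordiv_mul_add_mod a b
    linarith [mul_comm b (PySem.Int.floordiv a b)]⟩

-- Python mod is invariant under adding multiples of the divisor
theorem pv_mod_congr (b : Int) (hb : b ≠ 0) (a a' : Int) (h : b ∣ (a - a')) :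
    PySem.Int.mod a b = PySem.Int.mod a' b := by
  have h1 := pv_dvd_sub_mod a b
  have h2 := pv_dvd_sub_mod a' b
  have hd : b ∣ (PySem.Int.mod a b - PySem.Int.mod a' b) := by
    have := (h.sub h1).add h2
    convert this using 1; ring
  have hz : PySem.Int.mod a b - PySem.Int.mod a' b = 0 := by
    rcases lt_or_gt_of_ne hb with hbneg | hbpos
    · obtain ⟨l1, l2⟩ := PySem.Int.mod_neg_bounds (a := a) hbneg
      obtain ⟨l3, l4⟩ := PySem.Int.mod_neg_bounds (a := a') hbneg
      exact Int.eq_zero_of_dvd_of_natAbs_lt_natAbs hd (by omega)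
    · have l1 := PySem.Int.mod_nonneg (a := a) hbpos
      have l2 := PySem.Int.mod_lt (a := a) hbpos
      have l3 := PySem.Int.mod_nonneg (a := a') hbpos
      have l4 := PySem.Int.mod_lt (a := a') hbpos
      exact Int.eq_zero_of_dvd_of_natAbs_lt_natAbs hd (by omega)
  omega

theorem pv_mod_zero (b : Int) (hb : b ≠ 0) : PySem.Int.mod 0 b = 0 := by
  have h1 := pv_dvd_sub_mod 0 b
  have hd : b ∣ PySem.Int.mod 0 b := by
    have h2 := dvd_neg.mpr h1; simpa using h2
  rcases lt_or_gt_of_ne hb with hbneg | hbpos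
  · obtain ⟨l1, l2⟩ := PySem.Int.mod_neg_bounds (a := (0 : Int)) hbneg
    exact Int.eq_zero_of_dvd_of_natAbs_lt_natAbs hd (by omega)
  · have l1 := PySem.Int.mod_nonneg (a := (0 : Int)) hbpos
    have l2 := PySem.Int.mod_lt (a := (0 : Int)) hbpos
    exact Int.eq_zero_of_dvd_of_natAbs_lt_natAbs hd (by omega)

-- A's per-digit step, abstracted over the digit value
def pvStepA (base d : Int) (p : Int × Int) (c : Int) : Int × Int :=
  (PySem.Int.mod (p.1 + PySem.Int.mod (c * PySem.Int.mod p.2 d) d) d, p.2 * base)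

-- little-endian value of a digit list
def pvL (base : Int) (r : List Int) : Int := r.foldr (fun c a => c + base * a) 0

-- A's range loop is the digit loop over the reversed prefix of length k
theorem pv_rangeA (nums : List Int) (base d : Int) :
    ∀ (k : Nat), k ≤ nums.length → ∀ (p : Int × Int),
    (PySem.List.pyRange ((nums.length : Int) - k) (nums.length : Int) 1).foldl
      (fun (p : Int × Int) (i : Int) =>
        (PySem.Int.mod (p.1 + PySem.Int.mod (PySem.List.pyGetD nums (-i - 1) 0 * PySem.Int.mod p.2 d) d) d,
         p.2 * base)) p
      = ((nums.take k).reverse).foldl (pvStepA base d) p := by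
  intro k
  induction k with
  | zero =>
    intro _ p
    rw [PySem.List.pyRange_one_eq_nil (by omega)]
    simp
  | succ k ih =>
    intro hk p
    have hn : k < nums.length := by omega
    rw [PySem.List.pyRange_one_cons (by push_cast; omega)]
    have hidx : -((nums.length : Int) - ((k + 1 : Nat) : Int)) - 1 = -(((nums.length - k : Nat) : Int)) := by
      push_cast; omega
    have hstart : (nums.length : Int) - ((k + 1 : Nat) : Int) + 1 = (nums.length : Int) - ((k : Nat) : Int) := by push_cast; ring
    rw [List.foldl_cons, hidx, hstart,
        PySem.List.pyGetD_neg_natCast nums (nums.length - k) 0 (by omega) (by omega)]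
    have hsub : nums.length - (nums.length - k) = k := by omega
    rw [ih (by omega)]
    have htake : (nums.take (k + 1)).reverse = nums[k] :: (nums.take k).reverse := by
      rw [List.take_add_one, List.getElem?_eq_getElem hn]
      simp
    simp only [hsub]
    rw [htake, List.foldl_cons]
    rfl

-- value of A's digit loop, modulo d
theorem pv_A_val (base d : Int) (hd : d ≠ 0) :
    ∀ (r : List Int) (x m : Int),
    (r.foldl (pvStepA base d) (PySem.Int.mod x d, m)).1
      = PySem.Int.mod (x + m * pvL base r) d := by
  intro r
  induction r with
  | nil =>
    intro x m
    simp [pvL]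
  | cons c t ih =>
    intro x m
    rw [List.foldl_cons]
    have hstep : pvStepA base d (PySem.Int.mod x d, m) c
        = (PySem.Int.mod (x + m * c) d, m * base) := by
      unfold pvStepA
      simp only
      congr 1
      apply pv_mod_congr d hd
      have h1 := pv_dvd_sub_mod x d
      have h2 := pv_dvd_sub_mod (c * PySem.Int.mod m d) d
      have h3 := pv_dvd_sub_mod m d
      have h4 := (h1.add h2).add (h3.mul_left c)
      have h5 := dvd_neg.mpr h4
      convert h5 using 1; ring
    rw [hstep, ih (x + m * c) (m * base)]
    have : x + m * c + m * base * pvL base t = x + m * pvL base (c :: t) := by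
      simp [pvL]; ring
    rw [this]

-- value of B's Horner loop, modulo d
theorem pv_B_val (base d : Int) (hd : d ≠ 0) :
    ∀ (l : List Int) (x : Int),
    l.foldl (fun x c => PySem.Int.mod (x * base + c) d) (PySem.Int.mod x d)
      = PySem.Int.mod (l.foldl (fun a c => a * base + c) x) d := by
  intro l
  induction l with
  | nil => intro x; rfl
  | cons c t ih =>
    intro x
    rw [List.foldl_cons, List.foldl_cons]
    have hstep : PySem.Int.mod (PySem.Int.mod x d * base + c) d
        = PySem.Int.mod (x * base + c) d := by
      apply pv_mod_congr d hd
      have h1 := (pv_dvd_sub_mod x d).mul_left base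
      have h2 := dvd_neg.mpr h1
      convert h2 using 1; ring
    rw [hstep, ← ih (x * base + c)]

-- ===== VERDICT (by name: the statement is the Claim_ definition above) =====
theorem interpret_mod_spec : Claim_equal_interpret_mod := by
  intro nums base d _ hpre
  unfold Spec_interpret_mod
  rcases hpre with hnil | hd
  · subst hnil; rfl
  · have hA0 := pv_rangeA nums base d nums.length le_rfl (0, 1)
    have hA := pv_A_val base d hd nums.reverse 0 1
    rw [pv_mod_zero d hd] at hA
    have hB := pv_B_val base d hd nums 0
    rw [pv_mod_zero d hd] at hB
    unfold interpret_mod interpret_mod_alt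
    rw [show PySem.List.pyRange 0 (nums.length : Int) 1
          = PySem.List.pyRange ((nums.length : Int) - (nums.length : Nat)) (nums.length : Int) 1
        by norm_num]
    rw [hA0, List.take_length, hA, hB]
    have hrev : pvL base nums.reverse = nums.foldl (fun a c => a * base + c) 0 := by
      unfold pvL
      rw [List.foldr_reverse]
      have hfun : (fun (x y : Int) => y + base * x) = (fun (a c : Int) => a * base + c) := by
        funext a c; ring
      rw [hfun]
    rw [hrev]
    congr 1
    ring
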